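-- pv_equiv track=rewrite | github.com/aayu3/GrowthDataScanner | src/relic_processor.py | build_pages_from_rows
-- ===== SOURCE A (Python) =====
-- def build_pages_from_rows(rows, window_height, margin=60):
--     """Group consecutive rows into pages based on window_height minus margin.
--     rows: list of rows (each row is list of (cx,cy,cat)), sorted by y."""
--     if not rows:
--         return []
--
--     pages = []
--     i = 0
--     while i < len(rows):
--         page = [rows[i]]
--         top_y = min(r[1] for r in rows[i])
--         j = i + 1
--         while j < len(rows):
--             # representative y for candidate row
--             row_y = min(r[1] for r in rows[j])
--             if row_y - top_y <= (window_height - margin):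
--                 page.append(rows[j])
--                 j += 1
--             else:
--                 break
--         pages.append(page)
--         i = j
--     return pages
-- ===== SOURCE B (Python) =====
-- def _first_page_len(ys, thr):
--     """Length of the first page of the (nonempty) y-list ys."""
--     cnt = 1
--     for y in ys[1:]:
--         if y - ys[0] > thr:
--             break
--         cnt += 1
--     return cnt
--
--
-- def build_pages_from_rows(rows, window_height, margin=60):
--     """Staged: precompute per-row y, compute page boundary indices, slice rows."""
--     thr = window_height - margin
--     ys = [min(p[1] for p in row) for row in rows]
--     bounds = [0]
--     rest = ys
--     while rest:
--         cnt = _first_page_len(rest, thr)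
--         bounds.append(bounds[-1] + cnt)
--         rest = rest[cnt:]
--     return [rows[b:e] for b, e in zip(bounds, bounds[1:])]
-- ===== Notes on version B (the rewrite author's own statement) =====
-- stated objective: simpler
-- what changed: Replaces A's nested whiles that build each page by appending rows with staged passes: precompute each row's min y, compute the page boundary indices with a counting helper, then construct every page as a slice rows[b:e] via zip over consecutive bounds.
-- outside the precondition, e.g. on build_pages_from_rows([[]], 100, 60): A raises ValueError, B raises ValueError
import Mathlib
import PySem

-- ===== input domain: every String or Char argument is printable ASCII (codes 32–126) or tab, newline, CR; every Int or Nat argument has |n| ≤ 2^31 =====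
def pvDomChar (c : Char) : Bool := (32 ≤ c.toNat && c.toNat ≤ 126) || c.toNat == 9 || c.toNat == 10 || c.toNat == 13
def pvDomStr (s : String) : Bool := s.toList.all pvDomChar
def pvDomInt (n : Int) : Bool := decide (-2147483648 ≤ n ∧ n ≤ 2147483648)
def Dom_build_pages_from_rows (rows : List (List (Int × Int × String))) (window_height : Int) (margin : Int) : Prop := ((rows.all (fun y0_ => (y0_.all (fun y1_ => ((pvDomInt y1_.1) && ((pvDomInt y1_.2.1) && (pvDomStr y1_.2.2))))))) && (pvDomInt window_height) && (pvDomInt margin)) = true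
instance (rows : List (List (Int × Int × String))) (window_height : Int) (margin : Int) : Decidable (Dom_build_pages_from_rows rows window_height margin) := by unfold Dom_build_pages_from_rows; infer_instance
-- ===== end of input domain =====

-- B replaces A's nested page-building loops by staged passes: precompute each row's y,
-- compute the page boundary indices, and build every page as a slice rows[b:e] (simpler decomposition, same O(n) cost).

-- ===== PORT A =====
-- min(r[1] for r in row): Python's min raises ValueError on an empty row — excluded by Pre_; the default 0 is never read there.
def pvRowMinY (row : List (Int × Int × String)) : Int :=
  (PySem.List.min? (row.map (fun r => r.2.1)) (fun y => y)).getD 0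

-- the inner while loop of A: take rows while row_y - top_y <= thr; returns (page tail, remaining rows = j onward)
def pvAInner (thr t : Int) : List (List (Int × Int × String)) → List (List (Int × Int × String)) × List (List (Int × Int × String))
  | [] => ([], [])
  | r :: rs =>
    if pvRowMinY r - t ≤ thr then
      ((pvAInner thr t rs).1.cons r, (pvAInner thr t rs).2)
    else
      ([], r :: rs)

theorem pvAInner_snd_length (thr t : Int) : ∀ l, (pvAInner thr t l).2.length ≤ l.length := by
  intro l
  induction l with
  | nil => simp [pvAInner]
  | cons r rs ih =>
    simp only [pvAInner]
    split
    · exact Nat.le_succ_of_le ih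
    · simp

-- the outer while loop of A: start a page at the current row, run the inner loop, continue at i = j
def pvAOuter (thr : Int) : List (List (Int × Int × String)) → List (List (List (Int × Int × String)))
  | [] => []
  | r :: rs =>
    (r :: (pvAInner thr (pvRowMinY r) rs).1) :: pvAOuter thr (pvAInner thr (pvRowMinY r) rs).2
termination_by l => l.length
decreasing_by
  exact Nat.lt_succ_of_le (pvAInner_snd_length _ _ rs)

def build_pages_from_rows (rows : List (List (Int × Int × String))) (window_height : Int) (margin : Int) : List (List (List (Int × Int × String))) :=
  pvAOuter (window_height - margin) rows

-- ===== PORT B =====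
-- the for/break counting loop of _first_page_len over ys[1:]
def pvCount (thr top : Int) : List Int → Nat
  | [] => 0
  | y :: t => if y - top > thr then 0 else pvCount thr top t + 1

-- _first_page_len(ys, thr): cnt starts at 1; ys[0] is read only on nonempty ys (guarded by the while in Source B)
def pvFirstPageLen (thr : Int) (ys : List Int) : Nat :=
  pvCount thr (ys.headD 0) (ys.drop 1) + 1

-- the while loop of Source B: append bounds[-1] + cnt, continue on rest[cnt:]
def pvBounds (thr : Int) (b : Int) : List Int → List Int
  | [] => []
  | y :: t =>
    let c := pvFirstPageLen thr (y :: t)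
    (b + (c : Int)) :: pvBounds thr (b + (c : Int)) (t.drop (c - 1))
termination_by l => l.length
decreasing_by
  simp only [List.length_cons, List.length_drop]
  omega

def build_pages_from_rows_alt (rows : List (List (Int × Int × String))) (window_height : Int) (margin : Int) : List (List (List (Int × Int × String))) :=
  let thr := window_height - margin
  let ys := rows.map pvRowMinY
  let bounds := (0 : Int) :: pvBounds thr 0 ys
  (bounds.zip (bounds.drop 1)).map (fun be => PySem.List.slice rows (some be.1) (some be.2))

-- ===== PRECONDITION & SPEC =====
-- Pre_ excludes inputs containing an empty row, on which Python's min() (in A and in B alike) raises ValueError.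
def Pre_build_pages_from_rows (rows : List (List (Int × Int × String))) (window_height : Int) (margin : Int) : Prop :=
  ∀ row ∈ rows, row ≠ []
instance (rows : List (List (Int × Int × String))) (window_height : Int) (margin : Int) : Decidable (Pre_build_pages_from_rows rows window_height margin) := by unfold Pre_build_pages_from_rows; infer_instance

def pvWitness_build_pages_from_rows : (List (List (Int × Int × String))) × Int × Int :=
  ([[(1, 2, "a"), (3, 5, "b")], [(4, 40, "c")], [(2, 90, "d")]], 100, 60)

def Spec_build_pages_from_rows (rows : List (List (Int × Int × String))) (window_height : Int) (margin : Int) (out : List (List (List (Int × Int × String)))) : Prop := out = build_pages_from_rows_alt rows window_height margin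
instance (rows : List (List (Int × Int × String))) (window_height : Int) (margin : Int) (out : List (List (List (Int × Int × String)))) : Decidable (Spec_build_pages_from_rows rows window_height margin out) := by unfold Spec_build_pages_from_rows; infer_instance

-- ===== CLAIM (what is proved, stated in full; the proofs are below) =====
def Claim_equal_build_pages_from_rows : Prop := ∀ (rows : List (List (Int × Int × String))) (window_height : Int) (margin : Int), Dom_build_pages_from_rows rows window_height margin → Pre_build_pages_from_rows rows window_height margin → Spec_build_pages_from_rows rows window_height margin (build_pages_from_rows rows window_height margin)

-- ===== LEMMAS AND PROOFS =====

-- A's inner loop splits the suffix at the index pvCount computes on the mapped y-list.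
theorem pvAInner_eq (thr t : Int) : ∀ (l : List (List (Int × Int × String))),
    pvAInner thr t l = (l.take (pvCount thr t (l.map pvRowMinY)), l.drop (pvCount thr t (l.map pvRowMinY))) := by
  intro l
  induction l with
  | nil => simp [pvAInner, pvCount]
  | cons r rs ih =>
    by_cases h : pvRowMinY r - t ≤ thr
    · simp [pvAInner, pvCount, h, not_lt.mpr h, ih]
    · simp [pvAInner, pvCount, h, lt_of_not_ge h]

-- The bound list produced from the suffix rows.drop b, zipped consecutively and sliced,
-- is exactly A's page list of that suffix.
theorem pvB_key (thr : Int) : ∀ (n : Nat) (l rows : List (List (Int × Int × String))) (b : Nat),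
    l.length ≤ n → rows.drop b = l →
    ((((b : Int) :: pvBounds thr (b : Int) (l.map pvRowMinY)).zip (pvBounds thr (b : Int) (l.map pvRowMinY))).map
        (fun be => PySem.List.slice rows (some be.1) (some be.2)))
      = pvAOuter thr l := by
  intro n
  induction n with
  | zero =>
    intro l rows b hlen _
    have : l = [] := List.length_eq_zero_iff.mp (Nat.le_zero.mp hlen)
    subst this
    simp [pvBounds, pvAOuter]
  | succ n ih =>
    intro l rows b hlen hdrop
    cases l with
    | nil => simp [pvBounds, pvAOuter]
    | cons r rs =>
      set c := pvCount thr (pvRowMinY r) (rs.map pvRowMinY) with hc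
      have hfpl : pvFirstPageLen thr ((r :: rs).map pvRowMinY) = c + 1 := by
        simp [pvFirstPageLen, hc]
      have hbounds : pvBounds thr (b : Int) ((r :: rs).map pvRowMinY)
          = ((b : Int) + ((c + 1 : Nat) : Int)) :: pvBounds thr ((b : Int) + ((c + 1 : Nat) : Int)) ((rs.drop c).map pvRowMinY) := by
        rw [List.map_cons, pvBounds]
        simp only [← List.map_cons, hfpl]
        simp [List.map_drop]
      have hslice : PySem.List.slice rows (some (b : Int)) (some ((b : Int) + ((c + 1 : Nat) : Int)))
          = r :: rs.take c := by
        rw [PySem.List.slice_natCast_add, hdrop]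
        simp
      have hdrop' : rows.drop (b + (c + 1)) = rs.drop c := by
        rw [← List.drop_drop, hdrop]
        simp
      have hlen' : (rs.drop c).length ≤ n := by
        simp only [List.length_cons] at hlen
        simp only [List.length_drop]
        omega
      have hihcast : ((b + (c + 1) : Nat) : Int) = (b : Int) + ((c + 1 : Nat) : Int) := by push_cast; ring
      have hih := ih (rs.drop c) rows (b + (c + 1)) hlen' hdrop'
      rw [hihcast] at hih
      rw [hbounds]
      simp only [List.zip_cons_cons, List.map_cons, hslice, hih]
      rw [pvAOuter]
      rw [pvAInner_eq]

theorem pvPorts_agree (rows : List (List (Int × Int × String))) (wh m : Int) :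
    build_pages_from_rows rows wh m = build_pages_from_rows_alt rows wh m := by
  unfold build_pages_from_rows build_pages_from_rows_alt
  have h := pvB_key (wh - m) rows.length rows rows 0 le_rfl (by simp)
  simpa using h.symm

-- ===== VERDICT (by name: the statement is the Claim_ definition above) =====
theorem build_pages_from_rows_spec : Claim_equal_build_pages_from_rows := by
  intro rows wh m _ _
  exact pvPorts_agree rows wh m
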